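-- pv_equiv track=rewrite | github.com/KlasScripts/ios-ffs-browser | adapters/ffs.py | _detect_user_prefix
-- ===== SOURCE A (Python) =====
-- def _has_prefix(zip_names: frozenset, prefix: str) -> bool:
--     """Return True if any entry in zip_names starts with *prefix* (with or without
--     a trailing slash), or is exactly *prefix*.  Handles zips that omit explicit
--     directory entries by checking file entries that live under the prefix."""
--     slash = prefix if prefix.endswith("/") else prefix + "/"
--     bare  = prefix.rstrip("/")
--     if bare in zip_names or slash in zip_names:
--         return True
--     return any(n.startswith(slash) for n in zip_names)
--
-- def _detect_user_prefix(zip_names: frozenset) -> tuple[str, bool]: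
--     """Return (user_prefix, old_layout) for the Cellebrite user partition.
--
--     Two Cellebrite layouts exist:
--     - New: filesystemN/mobile/  — msgpack keys are bare (mobile/...)
--            → ('filesystemN', False)
--     - Old: filesystemN/private/var/mobile/  — msgpack keys include private/var/
--            → ('filesystemN', True)
--
--     Falls back to ('filesystem2', False).
--
--     New-layout is checked across ALL filesystem numbers first, because some
--     iOS system partitions (filesystem1) contain a small number of stub entries
--     under private/var/mobile/ that would otherwise trigger a false old-layout
--     match before the real user partition (filesystem2) is examined."""
--     # Pass 1: new layout — mobile/wireless directly under filesystemN
--     for n in range(1, 10):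
--         prefix = f"filesystem{n}"
--         for root in ("mobile", "wireless"):
--             if _has_prefix(zip_names, f"{prefix}/{root}"):
--                 return prefix, False
--     # Pass 2: old layout — private/var/mobile under filesystemN
--     for n in range(1, 10):
--         prefix = f"filesystem{n}"
--         for root in ("mobile", "wireless"):
--             if _has_prefix(zip_names, f"{prefix}/private/var/{root}"):
--                 return prefix, True
--     return "filesystem2", False
-- ===== SOURCE B (Python) =====
-- def _detect_user_prefix(zip_names):
--     # One pass over zip_names: classify each entry and keep the smallest
--     # filesystem digit seen for the new layout and for the old layout.
--     best_new = None  # smallest digit (as a 1-char string) with filesystemD/<root>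
--     best_old = None  # smallest digit with filesystemD/private/var/<root>
--     for name in zip_names:
--         if not (name.startswith("filesystem") and name[10:11] in "123456789"):
--             continue
--         d = name[10:11]
--         rest = name[11:]
--         old = None
--         for root in ("mobile", "wireless"):
--             r = "/" + root
--             if rest == r or rest.startswith(r + "/"):
--                 old = False
--                 break
--             o = "/private/var" + r
--             if rest == o or rest.startswith(o + "/"):
--                 old = True
--                 break
--         if old is None:
--             continue
--         if old:
--             if best_old is None or d < best_old:
--                 best_old = d
--         else:
--             if best_new is None or d < best_new:
--                 best_new = d
--     if best_new is not None:
--         return "filesystem" + best_new, False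
--     if best_old is not None:
--         return "filesystem" + best_old, True
--     return "filesystem2", False
-- ===== Notes on version B (the rewrite author's own statement) =====
-- stated objective: faster
-- what changed: Replaces A's 36 priority-ordered _has_prefix probes (each probe scanning the whole name set) with a single pass over zip_names that classifies every entry by splitting off the 'filesystemD' head and keeps the minimum filesystem digit seen per layout.
import Mathlib
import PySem

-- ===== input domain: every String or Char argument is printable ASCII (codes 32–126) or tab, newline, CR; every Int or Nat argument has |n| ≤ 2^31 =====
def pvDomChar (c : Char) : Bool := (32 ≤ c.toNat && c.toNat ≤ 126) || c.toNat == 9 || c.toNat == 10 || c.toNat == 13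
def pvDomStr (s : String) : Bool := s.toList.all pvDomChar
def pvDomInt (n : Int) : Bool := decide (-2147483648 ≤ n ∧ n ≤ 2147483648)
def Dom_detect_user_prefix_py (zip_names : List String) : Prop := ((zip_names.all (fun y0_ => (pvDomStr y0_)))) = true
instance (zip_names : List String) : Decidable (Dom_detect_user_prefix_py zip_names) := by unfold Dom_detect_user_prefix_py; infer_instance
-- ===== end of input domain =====

-- B replaces A's 36 priority-ordered prefix probes (each scanning all names) by ONE pass over
-- zip_names that classifies each entry and keeps the minimum filesystem digit per layout (faster).

-- ===== PORT A =====
-- hand port of Python str.rstrip(chars) (PySem offers only the no-argument rstrip); exact: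
-- drops the longest trailing run of characters that occur in `chars`.
def pyRstripChars (cs chars : List Char) : List Char :=
  (cs.reverse.dropWhile (fun c => chars.contains c)).reverse

def hasPrefixPy (zip_names : List String) (pfx : List Char) : Bool :=
  let slash := if PySem.Chars.endswith pfx "/".toList then pfx else pfx ++ "/".toList
  let bare := pyRstripChars pfx "/".toList
  if (zip_names.any (fun n => n.toList == bare) || zip_names.any (fun n => n.toList == slash)) then
    true
  else
    zip_names.any (fun n => PySem.Chars.startswith n.toList slash)

-- 'for n in range(1,10): for root in ("mobile","wireless"): if _has_prefix(...): return prefix, …'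
-- (the two-element inner loop is unfolded to its two iterations)
def passNew (zip_names : List String) : List Int → Option (List Char)
  | [] => none
  | n :: ns =>
    let pfx := "filesystem".toList ++ PySem.Int.toChars n
    if hasPrefixPy zip_names ((pfx ++ "/".toList) ++ "mobile".toList) then some pfx
    else if hasPrefixPy zip_names ((pfx ++ "/".toList) ++ "wireless".toList) then some pfx
    else passNew zip_names ns

def passOld (zip_names : List String) : List Int → Option (List Char)
  | [] => none
  | n :: ns =>
    let pfx := "filesystem".toList ++ PySem.Int.toChars n
    if hasPrefixPy zip_names ((pfx ++ "/private/var/".toList) ++ "mobile".toList) then some pfx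
    else if hasPrefixPy zip_names ((pfx ++ "/private/var/".toList) ++ "wireless".toList) then some pfx
    else passOld zip_names ns

def detect_user_prefix_py (zip_names : List String) : String × Bool :=
  match passNew zip_names (PySem.List.pyRange 1 10 1) with
  | some pfx => (String.ofList pfx, false)
  | none =>
    match passOld zip_names (PySem.List.pyRange 1 10 1) with
    | some pfx => (String.ofList pfx, true)
    | none => ("filesystem2", false)

-- ===== PORT B =====
-- 'for root in ("mobile","wireless"): if new-match: break; if old-match: break' for one root
def matchRootAlt (rest root : List Char) : Option Bool :=
  let r := "/".toList ++ root
  if (rest == r || PySem.Chars.startswith rest (r ++ "/".toList)) then some false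
  else
    let o := "/private/var".toList ++ r
    if (rest == o || PySem.Chars.startswith rest (o ++ "/".toList)) then some true
    else none

-- classification of one zip entry: 'name.startswith("filesystem") and name[10:11] in "123456789"'
def classifyAlt (cs : List Char) : Option (List Char × Bool) :=
  if (PySem.Chars.startswith cs "filesystem".toList
      && PySem.Chars.isIn (PySem.List.slice cs (some 10) (some 11)) "123456789".toList) then
    let d := PySem.List.slice cs (some 10) (some 11)
    let rest := PySem.List.slice cs (some 11) none
    match matchRootAlt rest "mobile".toList with
    | some b => some (d, b)
    | none =>
      match matchRootAlt rest "wireless".toList with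
      | some b => some (d, b)
      | none => none
  else none

-- 'best = d if best is None or d < best else best'
def minUpd (best : Option (List Char)) (d : List Char) : Option (List Char) :=
  match best with
  | none => some d
  | some b => if d < b then some d else some b

def detect_user_prefix_py_alt (zip_names : List String) : String × Bool :=
  let acc := zip_names.foldl
    (fun (acc : Option (List Char) × Option (List Char)) name =>
      match classifyAlt name.toList with
      | none => acc
      | some (d, false) => (minUpd acc.1 d, acc.2)
      | some (d, true) => (acc.1, minUpd acc.2 d))
    (none, none)
  match acc.1 with
  | some d => (String.ofList ("filesystem".toList ++ d), false)
  | none =>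
    match acc.2 with
    | some d => (String.ofList ("filesystem".toList ++ d), true)
    | none => ("filesystem2", false)

-- ===== PRECONDITION & SPEC =====
def Spec_detect_user_prefix_py (zip_names : List String) (out : String × Bool) : Prop := out = detect_user_prefix_py_alt zip_names
instance (zip_names : List String) (out : String × Bool) : Decidable (Spec_detect_user_prefix_py zip_names out) := by unfold Spec_detect_user_prefix_py; infer_instance

-- ===== CLAIM (what is proved, stated in full; the proofs are below) =====
def Claim_equal_detect_user_prefix_py : Prop := ∀ (zip_names : List String), Dom_detect_user_prefix_py zip_names → Spec_detect_user_prefix_py zip_names (detect_user_prefix_py zip_names)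

-- ===== LEMMAS AND PROOFS =====

-- 'entry matches prefix' in A's sense: equal to it, or extends it across a '/'
def tailCond (tail t : List Char) : Prop := t = tail ∨ (tail ++ ['/']) <+: t

def AMat (c : Char) (tail cs : List Char) : Prop :=
  cs = "filesystem".toList ++ c :: tail ∨ ("filesystem".toList ++ (c :: tail) ++ ['/']) <+: cs

theorem AMat_iff (c c' : Char) (tail t' : List Char) :
    AMat c tail ("filesystem".toList ++ c' :: t') ↔ c' = c ∧ tailCond tail t' := by
  unfold AMat tailCond
  rw [List.append_assoc, List.prefix_append_right_inj, List.append_right_inj]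
  simp [List.cons_prefix_cons, eq_comm, and_or_left]

theorem tailCond_prefix {tail t : List Char} (h : tailCond tail t) : tail <+: t := by
  rcases h with rfl | h
  · exact List.prefix_refl _
  · exact (List.prefix_append _ _).trans h

theorem get1_of_prefix {a b : Char} {l rest : List Char} (h : (a :: b :: l) <+: rest) :
    rest[1]? = some b := by
  obtain ⟨t, rfl⟩ := h; rfl

theorem mra_false_iff (rest root : List Char) :
    matchRootAlt rest root = some false ↔ tailCond ("/".toList ++ root) rest := by
  unfold matchRootAlt tailCond
  dsimp only
  split_ifs with h1 h2 <;>
    simp_all [PySem.Chars.startswith_iff]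
theorem mra_true_iff (rest root : List Char) :
    matchRootAlt rest root = some true ↔
      ¬ tailCond ("/".toList ++ root) rest ∧ tailCond ("/private/var".toList ++ ("/".toList ++ root)) rest := by
  unfold matchRootAlt tailCond
  dsimp only
  split_ifs with h1 h2 <;>
    simp_all [PySem.Chars.startswith_iff]
theorem mra_none_iff (rest root : List Char) :
    matchRootAlt rest root = none ↔
      ¬ tailCond ("/".toList ++ root) rest ∧ ¬ tailCond ("/private/var".toList ++ ("/".toList ++ root)) rest := by
  unfold matchRootAlt tailCond
  dsimp only
  split_ifs with h1 h2 <;>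
    simp_all [PySem.Chars.startswith_iff]

theorem classify_not_fs {cs : List Char} (h : ¬ "filesystem".toList <+: cs) :
    classifyAlt cs = none := by
  unfold classifyAlt
  have hf : PySem.Chars.startswith cs "filesystem".toList = false := by
    rw [Bool.eq_false_iff]
    intro hT
    exact h ((PySem.Chars.startswith_iff _ _).1 hT)
  rw [hf]
  simp

theorem classify_fs_nil : classifyAlt ("filesystem".toList) = none := by decide

theorem classify_cons (c : Char) (t : List Char) :
    classifyAlt ("filesystem".toList ++ c :: t) =
      if c ∈ "123456789".toList then
        (match matchRootAlt t "mobile".toList with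
         | some b => some ([c], b)
         | none =>
           match matchRootAlt t "wireless".toList with
           | some b => some ([c], b)
           | none => none)
      else none := by
  have hsl1 : PySem.List.slice ("filesystem".toList ++ c :: t) (some 10) (some 11) = [c] := by
    rw [show (10:Int) = ((10:Nat):Int) from rfl, show (11:Int) = ((11:Nat):Int) from rfl,
       PySem.List.slice_natCast, List.drop_left' (by decide)]
    simp
  have hsl2 : PySem.List.slice ("filesystem".toList ++ c :: t) (some 11) none = t := by
    rw [PySem.List.slice_from _ (by norm_num : (0:Int) ≤ 11),
        show ((11:Int).toNat) = 11 from rfl,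
        show "filesystem".toList ++ c :: t = ("filesystem".toList ++ [c]) ++ t by simp,
        List.drop_left' (by simp)]
  have hsw : PySem.Chars.startswith ("filesystem".toList ++ c :: t) "filesystem".toList = true := by
    rw [PySem.Chars.startswith_iff]; exact List.prefix_append _ _
  have hisin : PySem.Chars.isIn [c] "123456789".toList = decide (c ∈ "123456789".toList) := by
    by_cases h : c ∈ "123456789".toList
    · simp only [h, decide_true]
      rw [PySem.Chars.isIn_iff_infix, List.singleton_infix_iff]; exact h
    · simp only [h, decide_false]
      rw [Bool.eq_false_iff]
      intro hT
      rw [PySem.Chars.isIn_iff_infix, List.singleton_infix_iff] at hT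
      exact h hT
  unfold classifyAlt
  rw [hsl1, hsl2, hsw, hisin]
  by_cases h : c ∈ "123456789".toList
  · simp
  · simp

theorem AMat_fs {c : Char} {tail cs : List Char} (h : AMat c tail cs) :
    "filesystem".toList <+: cs := by
  rcases h with rfl | h
  · exact List.prefix_append _ _
  · exact ((List.prefix_append _ _).trans (List.prefix_append _ _)).trans h

theorem AMat_length {c : Char} {tail cs : List Char} (h : AMat c tail cs) : 10 < cs.length := by
  rcases h with rfl | h
  · simp
  · have h1 := h.length_le
    simp only [List.length_append, List.length_cons] at h1
    have hF10 : ("filesystem".toList).length = 10 := rfl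
    omega

theorem tc_get1 {root t : List Char} {a : Char} {r : List Char}
    (e : "/".toList ++ root = '/' :: a :: r)
    (h : tailCond ("/".toList ++ root) t) : t[1]? = some a := by
  have := tailCond_prefix h
  rw [e] at this
  exact get1_of_prefix this

theorem tc_get1_old {root t : List Char}
    (h : tailCond ("/private/var".toList ++ ("/".toList ++ root)) t) : t[1]? = some 'p' := by
  have := tailCond_prefix h
  have e : "/private/var".toList ++ ("/".toList ++ root) = '/' :: 'p' :: ("rivate/var".toList ++ ("/".toList ++ root)) := by
    rfl
  rw [e] at this
  exact get1_of_prefix this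

theorem classify_eq_iff (cs : List Char) (c : Char) (b : Bool) :
    classifyAlt cs = some ([c], b) ↔
      c ∈ "123456789".toList ∧
        ((b = false ∧ (AMat c ("/".toList ++ "mobile".toList) cs ∨ AMat c ("/".toList ++ "wireless".toList) cs)) ∨
         (b = true ∧ (AMat c ("/private/var".toList ++ ("/".toList ++ "mobile".toList)) cs ∨
                      AMat c ("/private/var".toList ++ ("/".toList ++ "wireless".toList)) cs))) := by
  by_cases hfs : "filesystem".toList <+: cs
  · obtain ⟨t, rfl⟩ := hfs
    cases t with
    | nil =>
      rw [List.append_nil, classify_fs_nil]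
      constructor
      · intro h; cases h
      · rintro ⟨hc, (⟨hb, h | h⟩ | ⟨hb, h | h⟩)⟩ <;>
          exact absurd (AMat_length h) (by decide)
    | cons c' t' =>
      rw [classify_cons]
      by_cases hd : c' ∈ "123456789".toList
      · rw [if_pos hd]
        simp only [AMat_iff]
        have eNm : ("/".toList ++ "mobile".toList : List Char) = '/' :: 'm' :: "obile".toList := rfl
        have eNw : ("/".toList ++ "wireless".toList : List Char) = '/' :: 'w' :: "ireless".toList := rfl
        have cl1 : ∀ {x y : Char}, t'[1]? = some x → t'[1]? = some y → x = y := by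
          intro x y h1 h2; rw [h1] at h2; exact Option.some.inj h2
        cases hm : matchRootAlt t' "mobile".toList with
        | some bm =>
          cases bm with
          | false =>
            have hNm := (mra_false_iff t' "mobile".toList).1 hm
            constructor
            · intro h
              simp only [Option.some.injEq, Prod.mk.injEq, List.cons.injEq, and_true] at h
              obtain ⟨rfl, hb⟩ := h
              exact ⟨hd, Or.inl ⟨hb.symm, Or.inl ⟨rfl, hNm⟩⟩⟩
            · rintro ⟨hc, (⟨hb, ⟨rfl, hNm'⟩ | ⟨rfl, hNw⟩⟩ | ⟨hb, ⟨rfl, hOm⟩ | ⟨rfl, hOw⟩⟩)⟩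
              · subst hb; rfl
              · subst hb; rfl
              · exact absurd (cl1 (tc_get1 eNm hNm) (tc_get1_old hOm)) (by decide)
              · exact absurd (cl1 (tc_get1 eNm hNm) (tc_get1_old hOw)) (by decide)
          | true =>
            obtain ⟨hnNm, hOm⟩ := (mra_true_iff t' "mobile".toList).1 hm
            constructor
            · intro h
              simp only [Option.some.injEq, Prod.mk.injEq, List.cons.injEq, and_true] at h
              obtain ⟨rfl, hb⟩ := h
              exact ⟨hd, Or.inr ⟨hb.symm, Or.inl ⟨rfl, hOm⟩⟩⟩
            · rintro ⟨hc, (⟨hb, ⟨rfl, hNm⟩ | ⟨rfl, hNw⟩⟩ | ⟨hb, ⟨rfl, hOm'⟩ | ⟨rfl, hOw⟩⟩)⟩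
              · exact absurd hNm hnNm
              · exact absurd (cl1 (tc_get1 eNw hNw) (tc_get1_old hOm)) (by decide)
              · subst hb; rfl
              · subst hb; rfl
        | none =>
          obtain ⟨hnNm, hnOm⟩ := (mra_none_iff t' "mobile".toList).1 hm
          cases hw : matchRootAlt t' "wireless".toList with
          | some bw =>
            cases bw with
            | false =>
              have hNw := (mra_false_iff t' "wireless".toList).1 hw
              constructor
              · intro h
                simp only [Option.some.injEq, Prod.mk.injEq, List.cons.injEq, and_true] at h
                obtain ⟨rfl, hb⟩ := h
                exact ⟨hd, Or.inl ⟨hb.symm, Or.inr ⟨rfl, hNw⟩⟩⟩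
              · rintro ⟨hc, (⟨hb, ⟨rfl, hNm⟩ | ⟨rfl, hNw'⟩⟩ | ⟨hb, ⟨rfl, hOm⟩ | ⟨rfl, hOw⟩⟩)⟩
                · exact absurd hNm hnNm
                · subst hb; rfl
                · exact absurd hOm hnOm
                · exact absurd (cl1 (tc_get1 eNw hNw) (tc_get1_old hOw)) (by decide)
            | true =>
              obtain ⟨hnNw, hOw⟩ := (mra_true_iff t' "wireless".toList).1 hw
              constructor
              · intro h
                simp only [Option.some.injEq, Prod.mk.injEq, List.cons.injEq, and_true] at h
                obtain ⟨rfl, hb⟩ := h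
                exact ⟨hd, Or.inr ⟨hb.symm, Or.inr ⟨rfl, hOw⟩⟩⟩
              · rintro ⟨hc, (⟨hb, ⟨rfl, hNm⟩ | ⟨rfl, hNw⟩⟩ | ⟨hb, ⟨rfl, hOm⟩ | ⟨rfl, hOw'⟩⟩)⟩
                · exact absurd hNm hnNm
                · exact absurd hNw hnNw
                · exact absurd hOm hnOm
                · subst hb; rfl
          | none =>
            obtain ⟨hnNw, hnOw⟩ := (mra_none_iff t' "wireless".toList).1 hw
            constructor
            · intro h; cases h
            · rintro ⟨hc, (⟨hb, ⟨rfl, hNm⟩ | ⟨rfl, hNw⟩⟩ | ⟨hb, ⟨rfl, hOm⟩ | ⟨rfl, hOw⟩⟩)⟩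
              · exact absurd hNm hnNm
              · exact absurd hNw hnNw
              · exact absurd hOm hnOm
              · exact absurd hOw hnOw
      · rw [if_neg hd]
        simp only [AMat_iff]
        constructor
        · intro h; cases h
        · rintro ⟨hc, (⟨hb, ⟨rfl, h⟩ | ⟨rfl, h⟩⟩ | ⟨hb, ⟨rfl, h⟩ | ⟨rfl, h⟩⟩)⟩ <;>
            exact absurd hc hd
  · rw [classify_not_fs hfs]
    constructor
    · intro h; cases h
    · rintro ⟨hc, (⟨hb, h | h⟩ | ⟨hb, h | h⟩)⟩ <;> exact absurd (AMat_fs h) hfs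

theorem classify_shape {cs d : List Char} {b : Bool} (h : classifyAlt cs = some (d, b)) :
    ∃ c, d = [c] ∧ c ∈ "123456789".toList := by
  by_cases hfs : "filesystem".toList <+: cs
  · obtain ⟨t, rfl⟩ := hfs
    cases t with
    | nil => rw [List.append_nil, classify_fs_nil] at h; cases h
    | cons c' t' =>
      rw [classify_cons] at h
      by_cases hd : c' ∈ "123456789".toList
      · rw [if_pos hd] at h
        refine ⟨c', ?_, hd⟩
        cases hm : matchRootAlt t' "mobile".toList with
        | some bm =>
          rw [hm] at h
          simp only [Option.some.injEq, Prod.mk.injEq] at h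
          exact h.1.symm
        | none =>
          rw [hm] at h
          cases hw : matchRootAlt t' "wireless".toList with
          | some bw =>
            rw [hw] at h
            simp only [Option.some.injEq, Prod.mk.injEq] at h
            exact h.1.symm
          | none => rw [hw] at h; cases h
      · rw [if_neg hd] at h; cases h
  · rw [classify_not_fs hfs] at h; cases h

theorem endswith_slash_false_of (p : List Char) (e : Char)
    (h : p.getLast? = some e) (he : e ≠ '/') :
    PySem.Chars.endswith p "/".toList = false := by
  rw [Bool.eq_false_iff]
  intro hT
  obtain ⟨t, ht⟩ := (PySem.Chars.endswith_iff _ _).1 hT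
  rw [← ht, show ("/".toList : List Char) = ['/'] from rfl, List.getLast?_concat] at h
  exact he (Option.some.inj h).symm

theorem rstrip_self_of (p : List Char) (e : Char)
    (hh : p.reverse.head? = some e) (he : e ≠ '/') :
    pyRstripChars p "/".toList = p := by
  unfold pyRstripChars
  cases hrev : p.reverse with
  | nil => rw [hrev] at hh; cases hh
  | cons a t =>
    rw [hrev] at hh
    obtain rfl : a = e := by simpa using hh
    have hc : (("/".toList : List Char).contains a) = false := by
      simpa using he
    rw [List.dropWhile_cons, hc]
    simp only [Bool.false_eq_true, if_false]
    rw [← hrev, List.reverse_reverse]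

theorem hasPrefix_eq (names : List String) (p : List Char)
    (h1 : PySem.Chars.endswith p "/".toList = false)
    (h2 : pyRstripChars p "/".toList = p) :
    (hasPrefixPy names p = true ↔ ∃ s ∈ names, (s.toList = p ∨ (p ++ ['/']) <+: s.toList)) := by
  unfold hasPrefixPy
  simp only [h1, Bool.false_eq_true, if_false, h2]
  rw [show ("/".toList : List Char) = ['/'] from rfl]
  split_ifs with hif
  · simp only [true_iff]
    rw [Bool.or_eq_true] at hif
    rcases hif with ha | ha <;>
      obtain ⟨s, hs, he⟩ := List.any_eq_true.1 ha
    · exact ⟨s, hs, Or.inl (by simpa using he)⟩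
    · exact ⟨s, hs, Or.inr (by rw [(by simpa using he : s.toList = p ++ ['/'])])⟩
  · rw [Bool.or_eq_true] at hif
    obtain ⟨hbar, _⟩ := not_or.1 hif
    rw [List.any_eq_true]
    constructor
    · rintro ⟨s, hs, he⟩
      exact ⟨s, hs, Or.inr ((PySem.Chars.startswith_iff _ _).1 he)⟩
    · rintro ⟨s, hs, he | he⟩
      · exact absurd (List.any_eq_true.2 ⟨s, hs, by simpa using he⟩) hbar
      · exact ⟨s, hs, (PySem.Chars.startswith_iff _ _).2 he⟩

theorem probe_core (names : List String) (c : Char) (tail : List Char)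
    (hend : PySem.Chars.endswith (("filesystem".toList ++ [c]) ++ tail) "/".toList = false)
    (hstr : pyRstripChars (("filesystem".toList ++ [c]) ++ tail) "/".toList
              = ("filesystem".toList ++ [c]) ++ tail) :
    (hasPrefixPy names (("filesystem".toList ++ [c]) ++ tail) = true
      ↔ ∃ s ∈ names, AMat c tail s.toList) := by
  rw [hasPrefix_eq names _ hend hstr]
  unfold AMat
  constructor <;>
    · rintro ⟨s, hs, h | h⟩
      · exact ⟨s, hs, Or.inl (by simpa [List.append_assoc] using h)⟩
      · exact ⟨s, hs, Or.inr (by simpa [List.append_assoc] using h)⟩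

def Eb (names : List String) (c : Char) (b : Bool) : Bool :=
  names.any (fun s => classifyAlt s.toList == some ([c], b))

theorem exMemOr {P Q : String → Prop} {l : List String} :
    ((∃ s ∈ l, P s) ∨ (∃ s ∈ l, Q s)) ↔ ∃ s ∈ l, (P s ∨ Q s) := by
  constructor
  · rintro (⟨s, hs, h⟩ | ⟨s, hs, h⟩)
    · exact ⟨s, hs, Or.inl h⟩
    · exact ⟨s, hs, Or.inr h⟩
  · rintro ⟨s, hs, h | h⟩
    · exact Or.inl ⟨s, hs, h⟩
    · exact Or.inr ⟨s, hs, h⟩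

theorem probe_new (names : List String) (c : Char) (hc : c ∈ "123456789".toList) :
    (hasPrefixPy names ((("filesystem".toList ++ [c]) ++ "/".toList) ++ "mobile".toList)
      || hasPrefixPy names ((("filesystem".toList ++ [c]) ++ "/".toList) ++ "wireless".toList))
    = Eb names c false := by
  have e1 : ((("filesystem".toList ++ [c]) ++ "/".toList) ++ "mobile".toList)
      = ("filesystem".toList ++ [c]) ++ ("/".toList ++ "mobile".toList) := by
    rw [List.append_assoc]
  have e2 : ((("filesystem".toList ++ [c]) ++ "/".toList) ++ "wireless".toList)
      = ("filesystem".toList ++ [c]) ++ ("/".toList ++ "wireless".toList) := by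
    rw [List.append_assoc]
  have hm1 : ("/".toList ++ "mobile".toList : List Char).getLast? = some 'e' := by decide
  have hm2 : ("/".toList ++ "mobile".toList : List Char).reverse.head? = some 'e' := by decide
  have hw1 : ("/".toList ++ "wireless".toList : List Char).getLast? = some 's' := by decide
  have hw2 : ("/".toList ++ "wireless".toList : List Char).reverse.head? = some 's' := by decide
  rw [Bool.eq_iff_iff, Bool.or_eq_true, e1, e2,
     probe_core names c _
       (endswith_slash_false_of _ 'e' (by rw [List.getLast?_append, hm1]; rfl) (by decide))
       (rstrip_self_of _ 'e' (by rw [List.reverse_append, List.head?_append, hm2]; rfl) (by decide)),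
     probe_core names c _
       (endswith_slash_false_of _ 's' (by rw [List.getLast?_append, hw1]; rfl) (by decide))
       (rstrip_self_of _ 's' (by rw [List.reverse_append, List.head?_append, hw2]; rfl) (by decide)),
     exMemOr]
  unfold Eb
  rw [List.any_eq_true]
  refine exists_congr fun s => and_congr_right fun _ => ?_
  rw [beq_iff_eq, classify_eq_iff]
  simp only [hc, true_and]
  simp

theorem probe_old (names : List String) (c : Char) (hc : c ∈ "123456789".toList) :
    (hasPrefixPy names ((("filesystem".toList ++ [c]) ++ "/private/var/".toList) ++ "mobile".toList)
      || hasPrefixPy names ((("filesystem".toList ++ [c]) ++ "/private/var/".toList) ++ "wireless".toList))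
    = Eb names c true := by
  have e1 : ((("filesystem".toList ++ [c]) ++ "/private/var/".toList) ++ "mobile".toList)
      = ("filesystem".toList ++ [c]) ++ ("/private/var".toList ++ ("/".toList ++ "mobile".toList)) := by
    rw [List.append_assoc]
    rw [show ("/private/var/".toList ++ "mobile".toList : List Char)
          = ("/private/var".toList ++ ("/".toList ++ "mobile".toList)) from by decide]
  have e2 : ((("filesystem".toList ++ [c]) ++ "/private/var/".toList) ++ "wireless".toList)
      = ("filesystem".toList ++ [c]) ++ ("/private/var".toList ++ ("/".toList ++ "wireless".toList)) := by
    rw [List.append_assoc]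
    rw [show ("/private/var/".toList ++ "wireless".toList : List Char)
          = ("/private/var".toList ++ ("/".toList ++ "wireless".toList)) from by decide]
  have hm1 : ("/private/var".toList ++ ("/".toList ++ "mobile".toList) : List Char).getLast? = some 'e' := by decide
  have hm2 : ("/private/var".toList ++ ("/".toList ++ "mobile".toList) : List Char).reverse.head? = some 'e' := by decide
  have hw1 : ("/private/var".toList ++ ("/".toList ++ "wireless".toList) : List Char).getLast? = some 's' := by decide
  have hw2 : ("/private/var".toList ++ ("/".toList ++ "wireless".toList) : List Char).reverse.head? = some 's' := by decide
  rw [Bool.eq_iff_iff, Bool.or_eq_true, e1, e2,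
     probe_core names c _
       (endswith_slash_false_of _ 'e' (by rw [List.getLast?_append, hm1]; rfl) (by decide))
       (rstrip_self_of _ 'e' (by rw [List.reverse_append, List.head?_append, hm2]; rfl) (by decide)),
     probe_core names c _
       (endswith_slash_false_of _ 's' (by rw [List.getLast?_append, hw1]; rfl) (by decide))
       (rstrip_self_of _ 's' (by rw [List.reverse_append, List.head?_append, hw2]; rfl) (by decide)),
     exMemOr]
  unfold Eb
  rw [List.any_eq_true]
  refine exists_congr fun s => and_congr_right fun _ => ?_
  rw [beq_iff_eq, classify_eq_iff]
  simp only [hc, true_and]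
  simp

def chainPairs : List (Char × Bool) :=
  [('1', false), ('2', false), ('3', false), ('4', false), ('5', false), ('6', false),
   ('7', false), ('8', false), ('9', false),
   ('1', true), ('2', true), ('3', true), ('4', true), ('5', true), ('6', true),
   ('7', true), ('8', true), ('9', true)]

def chain (names : List String) : String × Bool :=
  match chainPairs.find? (fun p => Eb names p.1 p.2) with
  | some (c, b) => (String.ofList ("filesystem".toList ++ [c]), b)
  | none => ("filesystem2", false)

theorem ifpair {α : Type} (a b : Bool) (x y : α) :
    (if a then x else if b then x else y) = if (a || b) then x else y := by
  cases a <;> simp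

theorem A_eq_chain (names : List String) : detect_user_prefix_py names = chain names := by
  unfold detect_user_prefix_py chain chainPairs
  rw [show PySem.List.pyRange 1 10 1 = [1,2,3,4,5,6,7,8,9] from by decide]
  simp only [passNew, passOld]
  simp only [show PySem.Int.toChars 1 = ['1'] from by decide, show PySem.Int.toChars 2 = ['2'] from by decide, show PySem.Int.toChars 3 = ['3'] from by decide, show PySem.Int.toChars 4 = ['4'] from by decide, show PySem.Int.toChars 5 = ['5'] from by decide, show PySem.Int.toChars 6 = ['6'] from by decide, show PySem.Int.toChars 7 = ['7'] from by decide, show PySem.Int.toChars 8 = ['8'] from by decide, show PySem.Int.toChars 9 = ['9'] from by decide]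
  simp only [ifpair]
  rw [probe_new names '1' (by decide)]
  rw [probe_new names '2' (by decide)]
  rw [probe_new names '3' (by decide)]
  rw [probe_new names '4' (by decide)]
  rw [probe_new names '5' (by decide)]
  rw [probe_new names '6' (by decide)]
  rw [probe_new names '7' (by decide)]
  rw [probe_new names '8' (by decide)]
  rw [probe_new names '9' (by decide)]
  rw [probe_old names '1' (by decide)]
  rw [probe_old names '2' (by decide)]
  rw [probe_old names '3' (by decide)]
  rw [probe_old names '4' (by decide)]
  rw [probe_old names '5' (by decide)]
  rw [probe_old names '6' (by decide)]
  rw [probe_old names '7' (by decide)]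
  rw [probe_old names '8' (by decide)]
  rw [probe_old names '9' (by decide)]
  by_cases h1 : Eb names '1' false = true
  · simp [List.find?, h1]
  by_cases h2 : Eb names '2' false = true
  · simp [List.find?, h1, h2]
  by_cases h3 : Eb names '3' false = true
  · simp [List.find?, h1, h2, h3]
  by_cases h4 : Eb names '4' false = true
  · simp [List.find?, h1, h2, h3, h4]
  by_cases h5 : Eb names '5' false = true
  · simp [List.find?, h1, h2, h3, h4, h5]
  by_cases h6 : Eb names '6' false = true
  · simp [List.find?, h1, h2, h3, h4, h5, h6]
  by_cases h7 : Eb names '7' false = true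
  · simp [List.find?, h1, h2, h3, h4, h5, h6, h7]
  by_cases h8 : Eb names '8' false = true
  · simp [List.find?, h1, h2, h3, h4, h5, h6, h7, h8]
  by_cases h9 : Eb names '9' false = true
  · simp [List.find?, h1, h2, h3, h4, h5, h6, h7, h8, h9]
  by_cases h10 : Eb names '1' true = true
  · simp [List.find?, h1, h2, h3, h4, h5, h6, h7, h8, h9, h10]
  by_cases h11 : Eb names '2' true = true
  · simp [List.find?, h1, h2, h3, h4, h5, h6, h7, h8, h9, h10, h11]
  by_cases h12 : Eb names '3' true = true
  · simp [List.find?, h1, h2, h3, h4, h5, h6, h7, h8, h9, h10, h11, h12]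
  by_cases h13 : Eb names '4' true = true
  · simp [List.find?, h1, h2, h3, h4, h5, h6, h7, h8, h9, h10, h11, h12, h13]
  by_cases h14 : Eb names '5' true = true
  · simp [List.find?, h1, h2, h3, h4, h5, h6, h7, h8, h9, h10, h11, h12, h13, h14]
  by_cases h15 : Eb names '6' true = true
  · simp [List.find?, h1, h2, h3, h4, h5, h6, h7, h8, h9, h10, h11, h12, h13, h14, h15]
  by_cases h16 : Eb names '7' true = true
  · simp [List.find?, h1, h2, h3, h4, h5, h6, h7, h8, h9, h10, h11, h12, h13, h14, h15, h16]
  by_cases h17 : Eb names '8' true = true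
  · simp [List.find?, h1, h2, h3, h4, h5, h6, h7, h8, h9, h10, h11, h12, h13, h14, h15, h16, h17]
  by_cases h18 : Eb names '9' true = true
  · simp [List.find?, h1, h2, h3, h4, h5, h6, h7, h8, h9, h10, h11, h12, h13, h14, h15, h16, h17, h18]
  simp [List.find?, h1, h2, h3, h4, h5, h6, h7, h8, h9, h10, h11, h12, h13, h14, h15, h16, h17, h18]

def pickNew (s : String) : Option (List Char) :=
  match classifyAlt s.toList with
  | some (d, false) => some d
  | _ => none

def pickOld (s : String) : Option (List Char) :=
  match classifyAlt s.toList with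
  | some (d, true) => some d
  | _ => none

theorem dig_cases {c : Char} (hc : c ∈ "123456789".toList) :
    c = '1' ∨ c = '2' ∨ c = '3' ∨ c = '4' ∨ c = '5' ∨ c = '6' ∨ c = '7' ∨ c = '8' ∨ c = '9' := by
  simpa using hc

theorem singleton_lt {a b : Char} : (([a] : List Char) < [b]) ↔ a < b := by
  simp [List.cons_lt_cons_iff]

theorem fold_pair (names : List String) (a b : Option (List Char)) :
    names.foldl
      (fun (acc : Option (List Char) × Option (List Char)) name =>
        match classifyAlt name.toList with
        | none => acc
        | some (d, false) => (minUpd acc.1 d, acc.2)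
        | some (d, true) => (acc.1, minUpd acc.2 d)) (a, b)
    = ((names.filterMap pickNew).foldl minUpd a, (names.filterMap pickOld).foldl minUpd b) := by
  induction names generalizing a b with
  | nil => rfl
  | cons s t ih =>
    rw [List.foldl_cons, List.filterMap_cons, List.filterMap_cons]
    cases hcl : classifyAlt s.toList with
    | none =>
      have e1 : pickNew s = none := by simp [pickNew, hcl]
      have e2 : pickOld s = none := by simp [pickOld, hcl]
      simp only [e1, e2]
      exact ih a b
    | some p =>
      obtain ⟨d, bb⟩ := p
      cases bb
      · have e1 : pickNew s = some d := by simp [pickNew, hcl]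
        have e2 : pickOld s = none := by simp [pickOld, hcl]
        simp only [e1, e2]
        exact ih (minUpd a d) b
      · have e1 : pickNew s = none := by simp [pickNew, hcl]
        have e2 : pickOld s = some d := by simp [pickOld, hcl]
        simp only [e1, e2]
        exact ih a (minUpd b d)

theorem foldlMinUpd_some (l : List (List Char)) (a : List Char) :
    ∃ m, l.foldl minUpd (some a) = some m ∧ (m = a ∨ m ∈ l) ∧ m ≤ a ∧ ∀ x ∈ l, m ≤ x := by
  induction l generalizing a with
  | nil => exact ⟨a, rfl, Or.inl rfl, le_refl _, by simp⟩
  | cons x t ih =>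
    rw [List.foldl_cons]
    by_cases hx : x < a
    · have e : minUpd (some a) x = some x := by simp [minUpd, hx]
      rw [e]
      obtain ⟨m, hm, hmem, hle, hall⟩ := ih x
      refine ⟨m, hm, Or.inr ?_, le_trans hle (le_of_lt hx), ?_⟩
      · rcases hmem with rfl | h
        · exact List.mem_cons_self
        · exact List.mem_cons_of_mem _ h
      · intro y hy
        rcases List.mem_cons.1 hy with rfl | hy
        · exact hle
        · exact hall y hy
    · have e : minUpd (some a) x = some a := by simp [minUpd, hx]
      rw [e]
      obtain ⟨m, hm, hmem, hle, hall⟩ := ih a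
      refine ⟨m, hm, ?_, hle, ?_⟩
      · rcases hmem with rfl | h
        · exact Or.inl rfl
        · exact Or.inr (List.mem_cons_of_mem _ h)
      · intro y hy
        rcases List.mem_cons.1 hy with rfl | hy
        · exact le_trans hle (not_lt.1 hx)
        · exact hall y hy

theorem foldMin_spec (l : List (List Char)) (m : List Char)
    (hmem : m ∈ l) (hmin : ∀ x ∈ l, m ≤ x) : l.foldl minUpd none = some m := by
  cases l with
  | nil => cases hmem
  | cons x t =>
    rw [List.foldl_cons, show minUpd none x = some x from rfl]
    obtain ⟨m', hm', hmem', hle', hall'⟩ := foldlMinUpd_some t x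
    rw [hm']
    have h1 : m' ≤ m := by
      rcases List.mem_cons.1 hmem with rfl | h
      · exact hle'
      · exact hall' m h
    have h2 : m ≤ m' := by
      rcases hmem' with rfl | h
      · exact hmin m' List.mem_cons_self
      · exact hmin m' (List.mem_cons_of_mem _ h)
    rw [le_antisymm h1 h2]

theorem mem_filterMap_pickNew (names : List String) (x : List Char) :
    x ∈ names.filterMap pickNew ↔ ∃ s ∈ names, classifyAlt s.toList = some (x, false) := by
  rw [List.mem_filterMap]
  refine exists_congr fun s => and_congr_right fun _ => ?_
  unfold pickNew
  cases hcl : classifyAlt s.toList with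
  | none => simp
  | some p =>
    obtain ⟨d, bb⟩ := p
    cases bb <;> simp

theorem mem_filterMap_pickOld (names : List String) (x : List Char) :
    x ∈ names.filterMap pickOld ↔ ∃ s ∈ names, classifyAlt s.toList = some (x, true) := by
  rw [List.mem_filterMap]
  refine exists_congr fun s => and_congr_right fun _ => ?_
  unfold pickOld
  cases hcl : classifyAlt s.toList with
  | none => simp
  | some p =>
    obtain ⟨d, bb⟩ := p
    cases bb <;> simp

theorem Eb_true_iff (names : List String) (c : Char) (b : Bool) :
    Eb names c b = true ↔ ∃ s ∈ names, classifyAlt s.toList = some ([c], b) := by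
  unfold Eb
  rw [List.any_eq_true]
  simp

theorem min_new_case (names : List String) (c0 : Char) (_hc0 : c0 ∈ "123456789".toList)
    (hE : Eb names c0 false = true)
    (hmin : ∀ c, c ∈ "123456789".toList → Eb names c false = true → ¬ c < c0) :
    (names.filterMap pickNew).foldl minUpd none = some [c0] := by
  apply foldMin_spec
  · rw [mem_filterMap_pickNew]
    exact (Eb_true_iff names c0 false).1 hE
  · intro x hx
    obtain ⟨s, hs, hcl⟩ := (mem_filterMap_pickNew names x).1 hx
    obtain ⟨c, rfl, hcd⟩ := classify_shape hcl
    have hEc : Eb names c false = true := (Eb_true_iff names c false).2 ⟨s, hs, hcl⟩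
    have hle : c0 ≤ c := not_lt.1 (fun h => hmin c hcd hEc h)
    rcases lt_or_eq_of_le hle with h | h
    · exact le_of_lt (singleton_lt.2 h)
    · exact le_of_eq (by rw [h])

theorem min_old_case (names : List String) (c0 : Char) (_hc0 : c0 ∈ "123456789".toList)
    (hE : Eb names c0 true = true)
    (hmin : ∀ c, c ∈ "123456789".toList → Eb names c true = true → ¬ c < c0) :
    (names.filterMap pickOld).foldl minUpd none = some [c0] := by
  apply foldMin_spec
  · rw [mem_filterMap_pickOld]
    exact (Eb_true_iff names c0 true).1 hE
  · intro x hx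
    obtain ⟨s, hs, hcl⟩ := (mem_filterMap_pickOld names x).1 hx
    obtain ⟨c, rfl, hcd⟩ := classify_shape hcl
    have hEc : Eb names c true = true := (Eb_true_iff names c true).2 ⟨s, hs, hcl⟩
    have hle : c0 ≤ c := not_lt.1 (fun h => hmin c hcd hEc h)
    rcases lt_or_eq_of_le hle with h | h
    · exact le_of_lt (singleton_lt.2 h)
    · exact le_of_eq (by rw [h])

theorem LN_nil (names : List String) (h : ∀ c, c ∈ "123456789".toList → Eb names c false ≠ true) :
    names.filterMap pickNew = [] := by
  rw [List.filterMap_eq_nil_iff]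
  intro s hs
  cases hp : pickNew s with
  | none => rfl
  | some x =>
    have hcl : classifyAlt s.toList = some (x, false) := by
      unfold pickNew at hp
      cases hcl : classifyAlt s.toList with
      | none => rw [hcl] at hp; cases hp
      | some p =>
        obtain ⟨d, bb⟩ := p
        rw [hcl] at hp
        cases bb
        · cases hp; rfl
        · cases hp
    obtain ⟨c, rfl, hcd⟩ := classify_shape hcl
    exact absurd ((Eb_true_iff names c false).2 ⟨s, hs, hcl⟩) (h c hcd)

theorem LO_nil (names : List String) (h : ∀ c, c ∈ "123456789".toList → Eb names c true ≠ true) :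
    names.filterMap pickOld = [] := by
  rw [List.filterMap_eq_nil_iff]
  intro s hs
  cases hp : pickOld s with
  | none => rfl
  | some x =>
    have hcl : classifyAlt s.toList = some (x, true) := by
      unfold pickOld at hp
      cases hcl : classifyAlt s.toList with
      | none => rw [hcl] at hp; cases hp
      | some p =>
        obtain ⟨d, bb⟩ := p
        rw [hcl] at hp
        cases bb
        · cases hp
        · cases hp; rfl
    obtain ⟨c, rfl, hcd⟩ := classify_shape hcl
    exact absurd ((Eb_true_iff names c true).2 ⟨s, hs, hcl⟩) (h c hcd)

theorem B_eq_chain (names : List String) : detect_user_prefix_py_alt names = chain names := by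
  unfold detect_user_prefix_py_alt chain chainPairs
  rw [fold_pair]
  by_cases h1 : Eb names '1' false = true
  · have hbn := min_new_case names '1' (by decide) h1 (by
      intro c hc hEc
      rcases dig_cases hc with rfl | rfl | rfl | rfl | rfl | rfl | rfl | rfl | rfl <;>
        first | decide)
    rw [hbn]
    simp [List.find?, h1]
  by_cases h2 : Eb names '2' false = true
  · have hbn := min_new_case names '2' (by decide) h2 (by
      intro c hc hEc
      rcases dig_cases hc with rfl | rfl | rfl | rfl | rfl | rfl | rfl | rfl | rfl <;>
        first | decide | exact absurd hEc h1)
    rw [hbn]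
    simp [List.find?, h1, h2]
  by_cases h3 : Eb names '3' false = true
  · have hbn := min_new_case names '3' (by decide) h3 (by
      intro c hc hEc
      rcases dig_cases hc with rfl | rfl | rfl | rfl | rfl | rfl | rfl | rfl | rfl <;>
        first | decide | exact absurd hEc h1 | exact absurd hEc h2)
    rw [hbn]
    simp [List.find?, h1, h2, h3]
  by_cases h4 : Eb names '4' false = true
  · have hbn := min_new_case names '4' (by decide) h4 (by
      intro c hc hEc
      rcases dig_cases hc with rfl | rfl | rfl | rfl | rfl | rfl | rfl | rfl | rfl <;>
        first | decide | exact absurd hEc h1 | exact absurd hEc h2 | exact absurd hEc h3)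
    rw [hbn]
    simp [List.find?, h1, h2, h3, h4]
  by_cases h5 : Eb names '5' false = true
  · have hbn := min_new_case names '5' (by decide) h5 (by
      intro c hc hEc
      rcases dig_cases hc with rfl | rfl | rfl | rfl | rfl | rfl | rfl | rfl | rfl <;>
        first | decide | exact absurd hEc h1 | exact absurd hEc h2 | exact absurd hEc h3 | exact absurd hEc h4)
    rw [hbn]
    simp [List.find?, h1, h2, h3, h4, h5]
  by_cases h6 : Eb names '6' false = true
  · have hbn := min_new_case names '6' (by decide) h6 (by
      intro c hc hEc
      rcases dig_cases hc with rfl | rfl | rfl | rfl | rfl | rfl | rfl | rfl | rfl <;>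
        first | decide | exact absurd hEc h1 | exact absurd hEc h2 | exact absurd hEc h3 | exact absurd hEc h4 | exact absurd hEc h5)
    rw [hbn]
    simp [List.find?, h1, h2, h3, h4, h5, h6]
  by_cases h7 : Eb names '7' false = true
  · have hbn := min_new_case names '7' (by decide) h7 (by
      intro c hc hEc
      rcases dig_cases hc with rfl | rfl | rfl | rfl | rfl | rfl | rfl | rfl | rfl <;>
        first | decide | exact absurd hEc h1 | exact absurd hEc h2 | exact absurd hEc h3 | exact absurd hEc h4 | exact absurd hEc h5 | exact absurd hEc h6)
    rw [hbn]
    simp [List.find?, h1, h2, h3, h4, h5, h6, h7]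
  by_cases h8 : Eb names '8' false = true
  · have hbn := min_new_case names '8' (by decide) h8 (by
      intro c hc hEc
      rcases dig_cases hc with rfl | rfl | rfl | rfl | rfl | rfl | rfl | rfl | rfl <;>
        first | decide | exact absurd hEc h1 | exact absurd hEc h2 | exact absurd hEc h3 | exact absurd hEc h4 | exact absurd hEc h5 | exact absurd hEc h6 | exact absurd hEc h7)
    rw [hbn]
    simp [List.find?, h1, h2, h3, h4, h5, h6, h7, h8]
  by_cases h9 : Eb names '9' false = true
  · have hbn := min_new_case names '9' (by decide) h9 (by
      intro c hc hEc
      rcases dig_cases hc with rfl | rfl | rfl | rfl | rfl | rfl | rfl | rfl | rfl <;>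
        first | decide | exact absurd hEc h1 | exact absurd hEc h2 | exact absurd hEc h3 | exact absurd hEc h4 | exact absurd hEc h5 | exact absurd hEc h6 | exact absurd hEc h7 | exact absurd hEc h8)
    rw [hbn]
    simp [List.find?, h1, h2, h3, h4, h5, h6, h7, h8, h9]
  have hLN : names.filterMap pickNew = [] := LN_nil names (by
    intro c hc
    rcases dig_cases hc with rfl | rfl | rfl | rfl | rfl | rfl | rfl | rfl | rfl <;>
      assumption)
  rw [hLN]
  by_cases h10 : Eb names '1' true = true
  · have hbo := min_old_case names '1' (by decide) h10 (by
      intro c hc hEc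
      rcases dig_cases hc with rfl | rfl | rfl | rfl | rfl | rfl | rfl | rfl | rfl <;>
        first | decide)
    rw [hbo]
    simp [List.find?, h1, h2, h3, h4, h5, h6, h7, h8, h9, h10]
  by_cases h11 : Eb names '2' true = true
  · have hbo := min_old_case names '2' (by decide) h11 (by
      intro c hc hEc
      rcases dig_cases hc with rfl | rfl | rfl | rfl | rfl | rfl | rfl | rfl | rfl <;>
        first | decide | exact absurd hEc h10)
    rw [hbo]
    simp [List.find?, h1, h2, h3, h4, h5, h6, h7, h8, h9, h10, h11]
  by_cases h12 : Eb names '3' true = true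
  · have hbo := min_old_case names '3' (by decide) h12 (by
      intro c hc hEc
      rcases dig_cases hc with rfl | rfl | rfl | rfl | rfl | rfl | rfl | rfl | rfl <;>
        first | decide | exact absurd hEc h10 | exact absurd hEc h11)
    rw [hbo]
    simp [List.find?, h1, h2, h3, h4, h5, h6, h7, h8, h9, h10, h11, h12]
  by_cases h13 : Eb names '4' true = true
  · have hbo := min_old_case names '4' (by decide) h13 (by
      intro c hc hEc
      rcases dig_cases hc with rfl | rfl | rfl | rfl | rfl | rfl | rfl | rfl | rfl <;>
        first | decide | exact absurd hEc h10 | exact absurd hEc h11 | exact absurd hEc h12)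
    rw [hbo]
    simp [List.find?, h1, h2, h3, h4, h5, h6, h7, h8, h9, h10, h11, h12, h13]
  by_cases h14 : Eb names '5' true = true
  · have hbo := min_old_case names '5' (by decide) h14 (by
      intro c hc hEc
      rcases dig_cases hc with rfl | rfl | rfl | rfl | rfl | rfl | rfl | rfl | rfl <;>
        first | decide | exact absurd hEc h10 | exact absurd hEc h11 | exact absurd hEc h12 | exact absurd hEc h13)
    rw [hbo]
    simp [List.find?, h1, h2, h3, h4, h5, h6, h7, h8, h9, h10, h11, h12, h13, h14]
  by_cases h15 : Eb names '6' true = true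
  · have hbo := min_old_case names '6' (by decide) h15 (by
      intro c hc hEc
      rcases dig_cases hc with rfl | rfl | rfl | rfl | rfl | rfl | rfl | rfl | rfl <;>
        first | decide | exact absurd hEc h10 | exact absurd hEc h11 | exact absurd hEc h12 | exact absurd hEc h13 | exact absurd hEc h14)
    rw [hbo]
    simp [List.find?, h1, h2, h3, h4, h5, h6, h7, h8, h9, h10, h11, h12, h13, h14, h15]
  by_cases h16 : Eb names '7' true = true
  · have hbo := min_old_case names '7' (by decide) h16 (by
      intro c hc hEc
      rcases dig_cases hc with rfl | rfl | rfl | rfl | rfl | rfl | rfl | rfl | rfl <;>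
        first | decide | exact absurd hEc h10 | exact absurd hEc h11 | exact absurd hEc h12 | exact absurd hEc h13 | exact absurd hEc h14 | exact absurd hEc h15)
    rw [hbo]
    simp [List.find?, h1, h2, h3, h4, h5, h6, h7, h8, h9, h10, h11, h12, h13, h14, h15, h16]
  by_cases h17 : Eb names '8' true = true
  · have hbo := min_old_case names '8' (by decide) h17 (by
      intro c hc hEc
      rcases dig_cases hc with rfl | rfl | rfl | rfl | rfl | rfl | rfl | rfl | rfl <;>
        first | decide | exact absurd hEc h10 | exact absurd hEc h11 | exact absurd hEc h12 | exact absurd hEc h13 | exact absurd hEc h14 | exact absurd hEc h15 | exact absurd hEc h16)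
    rw [hbo]
    simp [List.find?, h1, h2, h3, h4, h5, h6, h7, h8, h9, h10, h11, h12, h13, h14, h15, h16, h17]
  by_cases h18 : Eb names '9' true = true
  · have hbo := min_old_case names '9' (by decide) h18 (by
      intro c hc hEc
      rcases dig_cases hc with rfl | rfl | rfl | rfl | rfl | rfl | rfl | rfl | rfl <;>
        first | decide | exact absurd hEc h10 | exact absurd hEc h11 | exact absurd hEc h12 | exact absurd hEc h13 | exact absurd hEc h14 | exact absurd hEc h15 | exact absurd hEc h16 | exact absurd hEc h17)
    rw [hbo]
    simp [List.find?, h1, h2, h3, h4, h5, h6, h7, h8, h9, h10, h11, h12, h13, h14, h15, h16, h17, h18]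
  have hLO : names.filterMap pickOld = [] := LO_nil names (by
    intro c hc
    rcases dig_cases hc with rfl | rfl | rfl | rfl | rfl | rfl | rfl | rfl | rfl <;>
      assumption)
  rw [hLO]
  simp [List.find?, h1, h2, h3, h4, h5, h6, h7, h8, h9, h10, h11, h12, h13, h14, h15, h16, h17, h18]

-- ===== VERDICT (by name: the statement is the Claim_ definition above) =====
theorem detect_user_prefix_py_spec : Claim_equal_detect_user_prefix_py := by
  intro names _
  unfold Spec_detect_user_prefix_py
  rw [A_eq_chain, B_eq_chain]
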